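-- pv_equiv track=rewrite | github.com/kartikvrama/epic-kitchens-100-annotations | generate_object_last_action.py | _noun_token_bag
-- ===== SOURCE A (Python) =====
-- def _noun_token_bag(s):
--     """Bag of lowercase tokens from EPIC/Visor noun strings (handles `base:qualifier`, `/`, spaces)."""
--     if not s:
--         return frozenset()
--     tokens = []
--     for part in str(s).lower().replace(",", " ").split("/"):
--         part = part.strip()
--         for w in part.split():
--             for t in w.split(":"):
--                 t = t.strip()
--                 if t:
--                     tokens.append(t)
--     return frozenset(tokens)
-- ===== SOURCE B (Python) =====
-- def _noun_token_bag(s):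
--     """Bag of lowercase tokens: one flat character scan instead of nested split passes."""
--     if not s:
--         return frozenset()
--     delims = ",/:\t\n\r\x0b\x0c "
--     tokens = set()
--     cur = []
--     for ch in str(s).lower():
--         if ch in delims:
--             if cur:
--                 tokens.add("".join(cur))
--                 cur = []
--         else:
--             cur.append(ch)
--     if cur:
--         tokens.add("".join(cur))
--     return frozenset(tokens)
-- ===== Notes on version B (the rewrite author's own statement) =====
-- stated objective: alternative
-- what changed: Replaces A's comma-replace plus three nested split passes (on '/', whitespace, ':') with a single flat left-to-right character scan over one delimiter alphabet, flushing the accumulated token into the set at each delimiter.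
import Mathlib
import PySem

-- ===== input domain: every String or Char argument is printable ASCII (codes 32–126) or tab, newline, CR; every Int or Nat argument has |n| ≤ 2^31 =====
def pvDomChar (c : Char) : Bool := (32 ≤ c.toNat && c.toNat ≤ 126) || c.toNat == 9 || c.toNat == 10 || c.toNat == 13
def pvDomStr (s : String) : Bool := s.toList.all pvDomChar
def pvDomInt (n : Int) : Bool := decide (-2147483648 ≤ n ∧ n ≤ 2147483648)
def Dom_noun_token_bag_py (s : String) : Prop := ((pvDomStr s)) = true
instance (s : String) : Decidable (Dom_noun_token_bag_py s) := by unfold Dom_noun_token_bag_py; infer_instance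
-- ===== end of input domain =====

-- B replaces A's comma-replace plus three nested split passes by one flat character scan with a token accumulator (objective: alternative, same cost).


-- ===== PORT A =====
def noun_token_bag_py (s : String) : List String :=
  if s = "" then PySem.Set.empty
  else
    let base := PySem.Chars.replace (PySem.Chars.lower s.toList) [','] [' ']
    let tokens : List (List Char) :=
      (PySem.Chars.splitOn base ['/']).foldl (fun tokens part =>
        let part := PySem.Chars.strip part
        (PySem.Chars.split₀ part).foldl (fun tokens w =>
          (PySem.Chars.splitOn w [':']).foldl (fun tokens t =>
            let t := PySem.Chars.strip t
            if t ≠ [] then tokens ++ [t] else tokens) tokens) tokens) []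
    PySem.Set.ofList (tokens.map String.ofList)

-- ===== PORT B =====
-- delimiter alphabet of B: comma, slash, colon and Python's str.split() whitespace characters
def nounDelims : List Char := [',', '/', ':', '\t', '\n', '\r', '\x0B', '\x0C', ' ']

def noun_token_bag_py_alt (s : String) : List String :=
  if s = "" then PySem.Set.empty
  else
    let st := (PySem.Chars.lower s.toList).foldl
      (fun (st : PySem.Set String × List Char) ch =>
        if nounDelims.contains ch then
          (if st.2 ≠ [] then (PySem.Set.add st.1 (String.ofList st.2), ([] : List Char)) else st)
        else (st.1, st.2 ++ [ch])) (PySem.Set.empty, [])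
    if st.2 ≠ [] then PySem.Set.add st.1 (String.ofList st.2) else st.1

-- ===== PRECONDITION & SPEC =====
def Spec_noun_token_bag_py (s : String) (out : List String) : Prop := out = noun_token_bag_py_alt s
instance (s : String) (out : List String) : Decidable (Spec_noun_token_bag_py s out) := by unfold Spec_noun_token_bag_py; infer_instance

-- ===== CLAIM (what is proved, stated in full; the proofs are below) =====
def Claim_equal_noun_token_bag_py : Prop := ∀ (s : String), Dom_noun_token_bag_py s → Spec_noun_token_bag_py s (noun_token_bag_py s)

-- ===== LEMMAS AND PROOFS =====

-- maximal runs of non-delimiter characters of `cur ++ l`, `cur` being the partially read current run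
def runsAux (p : Char → Bool) : List Char → List Char → List (List Char)
  | cur, [] => if cur = [] then [] else [cur]
  | cur, c :: t =>
    if p c then (if cur = [] then runsAux p [] t else cur :: runsAux p [] t)
    else runsAux p (cur ++ [c]) t

-- the pieces of `cur ++ l` cut at every occurrence of `a` (empty pieces kept), as Python's str.split(a)
def piecesAux (a : Char) : List Char → List Char → List (List Char)
  | cur, [] => [cur]
  | cur, c :: t => if c = a then cur :: piecesAux a [] t else piecesAux a (cur ++ [c]) t

-- A's effective delimiter test (with the comma → space replacement folded in as delimB)
def delimA (c : Char) : Bool := (c == '/') || PySem.Chars.isspace c || (c == ':')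
def delimB (c : Char) : Bool := (c == ',') || delimA c

theorem runsAux_congr {p q : Char → Bool} : ∀ (l cur : List Char), (∀ x ∈ l, p x = q x) →
    runsAux p cur l = runsAux q cur l := by
  intro l
  induction l with
  | nil => intro cur h; rfl
  | cons c t ih =>
    intro cur h
    have hc : p c = q c := h c (by simp)
    have ht : ∀ x ∈ t, p x = q x := fun x hx => h x (by simp [hx])
    simp only [runsAux, hc]
    by_cases hq : q c = true
    · simp [hq, ih [] ht]
    · simp at hq
      simp [hq, ih (cur ++ [c]) ht]

theorem runsAux_all_not {p : Char → Bool} : ∀ (u cur : List Char), (∀ x ∈ u, p x = false) →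
    runsAux p cur u = if cur ++ u = [] then [] else [cur ++ u] := by
  intro u
  induction u with
  | nil => intro cur h; simp [runsAux]
  | cons c t ih =>
    intro cur h
    have hc : p c = false := h c (by simp)
    simp only [runsAux, hc, Bool.false_eq_true, if_false]
    rw [ih (cur ++ [c]) (fun x hx => h x (by simp [hx]))]
    simp

theorem runsAux_all_true {p : Char → Bool} : ∀ (v cur : List Char), (∀ x ∈ v, p x = true) →
    runsAux p cur v = if cur = [] then [] else [cur] := by
  intro v
  induction v with
  | nil => intro cur h; rfl
  | cons c t ih =>
    intro cur h
    have hc : p c = true := h c (by simp)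
    have ht : ∀ x ∈ t, p x = true := fun x hx => h x (by simp [hx])
    simp only [runsAux, hc, if_true]
    by_cases hcur : cur = [] <;> simp [hcur, ih [] ht]

theorem runsAux_flush {p : Char → Bool} {c : Char} (hc : p c = true) :
    ∀ (u cur t : List Char), runsAux p cur (u ++ c :: t) = runsAux p cur u ++ runsAux p [] t := by
  intro u
  induction u with
  | nil =>
    intro cur t
    simp only [List.nil_append, runsAux, hc, if_true]
    by_cases hcur : cur = [] <;> simp [hcur]
  | cons d u' ih =>
    intro cur t
    simp only [List.cons_append, runsAux]
    by_cases hd : p d = true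
    · simp only [hd, if_true]
      by_cases hcur : cur = [] <;> simp [hcur, ih]
    · simp only [hd]
      simp only [Bool.false_eq_true, if_false]
      exact ih (cur ++ [d]) t

theorem runsAux_mem_not {p : Char → Bool} : ∀ (l cur x : List Char), (∀ c ∈ cur, p c = false) →
    x ∈ runsAux p cur l → ∀ c ∈ x, p c = false := by
  intro l
  induction l with
  | nil =>
    intro cur x hcur hx
    by_cases h : cur = [] <;> simp [runsAux, h] at hx
    subst hx; exact hcur
  | cons c t ih =>
    intro cur x hcur hx
    by_cases hc : p c = true
    · simp only [runsAux, hc, if_true] at hx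
      by_cases hcurnil : cur = []
      · simp only [hcurnil, if_true] at hx
        exact ih [] x (by simp) hx
      · simp only [hcurnil, if_false, List.mem_cons] at hx
        rcases hx with rfl | hx
        · exact hcur
        · exact ih [] x (by simp) hx
    · simp only [runsAux, hc, if_false, Bool.false_eq_true] at hx
      exact ih (cur ++ [c]) x (by
        intro d hd; rcases List.mem_append.mp hd with h | h
        · exact hcur d h
        · simp at h; subst h; simpa using hc) hx

theorem runsAux_dropWhile {p : Char → Bool} : ∀ (l : List Char),
    runsAux p [] (l.dropWhile p) = runsAux p [] l := by
  intro l
  induction l with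
  | nil => rfl
  | cons c t ih =>
    by_cases hc : p c = true
    · simp [List.dropWhile, hc, runsAux, ih]
    · simp [List.dropWhile, hc]

theorem runsAux_append_all {p : Char → Bool} : ∀ (u v cur : List Char), (∀ x ∈ v, p x = true) →
    runsAux p cur (u ++ v) = runsAux p cur u := by
  intro u
  induction u with
  | nil =>
    intro v cur h
    rw [List.nil_append, runsAux_all_true v cur h]; rfl
  | cons c t ih =>
    intro v cur h
    simp only [List.cons_append, runsAux]
    by_cases hc : p c = true <;> simp [hc, ih v _ h]

theorem split₀_go_eq : ∀ (l : List Char) (cur : List Char) (acc : List (List Char)),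
    PySem.Chars.split₀.go l cur acc = acc.reverse ++ runsAux PySem.Chars.isspace cur.reverse l := by
  intro l
  induction l with
  | nil =>
    intro cur acc
    simp only [PySem.Chars.split₀.go, runsAux]
    by_cases h : cur = [] <;> simp [h, List.isEmpty_iff]
  | cons c t ih =>
    intro cur acc
    by_cases hc : PySem.Chars.isspace c = true
    · by_cases h : cur = []
      · simp [PySem.Chars.split₀.go, hc, h, ih, runsAux]
      · simp [PySem.Chars.split₀.go, hc, h, ih, runsAux]
    · simp [PySem.Chars.split₀.go, hc, ih, runsAux]

theorem split₀_eq_runs (l : List Char) : PySem.Chars.split₀ l = runsAux PySem.Chars.isspace [] l := by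
  simpa using split₀_go_eq l [] []

theorem strip_split₀ (l : List Char) :
    PySem.Chars.split₀ (PySem.Chars.strip l) = PySem.Chars.split₀ l := by
  rw [split₀_eq_runs, split₀_eq_runs]
  have hl : PySem.Chars.lstrip l = l.dropWhile PySem.Chars.isspace := rfl
  have hm : ∀ (m : List Char),
      m = PySem.Chars.rstrip m ++ (m.reverse.takeWhile PySem.Chars.isspace).reverse := by
    intro m
    simp only [PySem.Chars.rstrip]
    rw [← List.reverse_append, List.takeWhile_append_dropWhile, List.reverse_reverse]
  calc runsAux PySem.Chars.isspace [] (PySem.Chars.strip l)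
      = runsAux PySem.Chars.isspace [] (PySem.Chars.lstrip l) := by
        conv_rhs => rw [hm (PySem.Chars.lstrip l)]
        rw [runsAux_append_all]
        · rfl
        · intro x hx
          simp only [List.mem_reverse] at hx
          exact List.mem_takeWhile_imp hx
    _ = runsAux PySem.Chars.isspace [] l := by
        rw [hl, runsAux_dropWhile]

theorem splitOn_go_eq (a : Char) : ∀ (l : List Char) (fuel : Nat), l.length ≤ fuel →
    ∀ (cur : List Char) (acc : List (List Char)),
    PySem.Chars.splitOn.go [a] fuel l cur acc = acc.reverse ++ piecesAux a cur.reverse l := by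
  intro l
  induction l with
  | nil =>
    intro fuel _ cur acc
    cases fuel <;> simp [PySem.Chars.splitOn.go, piecesAux]
  | cons c t ih =>
    intro fuel hf cur acc
    cases fuel with
    | zero => simp at hf
    | succ f =>
      have hf' : t.length ≤ f := by simpa using hf
      by_cases hca : c = a
      · subst hca
        have hpre : List.isPrefixOf [c] (c :: t) = true := by simp [List.isPrefixOf]
        simp [PySem.Chars.splitOn.go, hpre, ih f hf', piecesAux]
      · have hpre : List.isPrefixOf [a] (c :: t) = false := by
          simp [List.isPrefixOf]; exact fun h => (hca h.symm).elim
        simp [PySem.Chars.splitOn.go, hpre, ih f hf', piecesAux, hca]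

theorem splitOn_eq_pieces (a : Char) (l : List Char) :
    PySem.Chars.splitOn l [a] = piecesAux a [] l := by
  have := splitOn_go_eq a l (l.length + 1) (by omega) [] []
  simpa [PySem.Chars.splitOn] using this

theorem replace_go_eq (a b : Char) : ∀ (l : List Char) (fuel : Nat), l.length ≤ fuel →
    ∀ (acc : List Char),
    PySem.Chars.replace.go [a] [b] fuel l acc = acc.reverse ++ l.map (fun c => if c = a then b else c) := by
  intro l
  induction l with
  | nil => intro fuel _ acc; cases fuel <;> simp [PySem.Chars.replace.go]
  | cons c t ih =>
    intro fuel hf acc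
    cases fuel with
    | zero => simp at hf
    | succ f =>
      have hf' : t.length ≤ f := by simpa using hf
      by_cases hca : c = a
      · subst hca
        have hpre : List.isPrefixOf [c] (c :: t) = true := by simp [List.isPrefixOf]
        simp [PySem.Chars.replace.go, hpre, ih f hf']
      · have hpre : List.isPrefixOf [a] (c :: t) = false := by
          simp [List.isPrefixOf]; exact fun h => (hca h.symm).elim
        simp [PySem.Chars.replace.go, hpre, ih f hf', hca]

theorem replace_single (a b : Char) (l : List Char) :
    PySem.Chars.replace l [a] [b] = l.map (fun c => if c = a then b else c) := by
  have := replace_go_eq a b l l.length le_rfl []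
  simpa [PySem.Chars.replace] using this

theorem strip_id (x : List Char) (h : ∀ c ∈ x, PySem.Chars.isspace c = false) :
    PySem.Chars.strip x = x := by
  have h1 : PySem.Chars.lstrip x = x := by
    simp only [PySem.Chars.lstrip]
    rw [List.dropWhile_eq_self_iff]
    intro hl hp
    exact absurd hp (by simp [h x[0] (List.getElem_mem hl)])
  have h2 : PySem.Chars.rstrip x = x := by
    simp only [PySem.Chars.rstrip]
    rw [List.dropWhile_eq_self_iff.mpr, List.reverse_reverse]
    intro hl hp
    have : x.reverse[0] ∈ x := List.mem_reverse.mp (List.getElem_mem (l := x.reverse) hl)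
    rw [h _ this] at hp; simp at hp
  simp [PySem.Chars.strip, h1, h2]

theorem piecesAux_flatMap (a : Char) (q : Char → Bool) : ∀ (l cur : List Char), (∀ x ∈ cur, ¬ x = a) →
    (piecesAux a cur l).flatMap (fun w => runsAux q [] w) = runsAux (fun c => c == a || q c) [] (cur ++ l) := by
  intro l
  induction l with
  | nil =>
    intro cur h
    simp only [piecesAux, List.flatMap_cons, List.flatMap_nil, List.append_nil]
    exact runsAux_congr cur [] (by intro x hx; simp [h x hx])
  | cons c t ih =>
    intro cur h
    by_cases hca : c = a
    · simp only [piecesAux, if_pos hca, List.flatMap_cons]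
      rw [ih [] (by simp)]
      subst hca
      rw [runsAux_flush (p := fun x => x == c || q x) (by simp) cur [] t]
      simp only [List.nil_append]
      congr 1
      exact (runsAux_congr cur [] (by intro x hx; simp [h x hx])).symm
    · simp only [piecesAux, if_neg hca]
      rw [ih (cur ++ [c]) ?_]
      · simp
      · intro x hx
        rcases List.mem_append.mp hx with h' | h'
        · exact h x h'
        · simp at h'; subst h'; exact hca

theorem runsAux_compose (p q : Char → Bool) : ∀ (l cur : List Char), (∀ x ∈ cur, p x = false) →
    (runsAux p cur l).flatMap (fun w => runsAux q [] w) = runsAux (fun c => p c || q c) [] (cur ++ l) := by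
  intro l
  induction l with
  | nil =>
    intro cur h
    by_cases hcur : cur = []
    · simp [runsAux, hcur]
    · simp only [runsAux, if_neg hcur, List.flatMap_cons, List.flatMap_nil, List.append_nil,
        List.append_nil]
      exact runsAux_congr cur [] (by intro x hx; simp [h x hx])
  | cons c t ih =>
    intro cur h
    by_cases hc : p c = true
    · have hrw : runsAux p cur (c :: t) = runsAux p cur [] ++ runsAux p [] t :=
        runsAux_flush hc [] cur t
      rw [hrw, List.flatMap_append, ih [] (by simp)]
      rw [runsAux_flush (p := fun x => p x || q x) (by simp [hc]) cur [] t]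
      simp only [List.nil_append]
      congr 1
      by_cases hcur : cur = []
      · simp [runsAux, hcur]
      · simp only [runsAux, if_neg hcur, List.flatMap_cons, List.flatMap_nil, List.append_nil]
        exact runsAux_congr cur [] (by intro x hx; simp [h x hx])
    · simp only [runsAux, hc, if_false, Bool.false_eq_true]
      rw [ih (cur ++ [c]) ?_]
      · simp
      · intro x hx
        rcases List.mem_append.mp hx with h' | h'
        · exact h x h'
        · simp at h'; subst h'; simpa using hc

theorem piecesAux_mem (a : Char) : ∀ (l cur x : List Char), x ∈ piecesAux a cur l → ∀ c ∈ x, c ∈ cur ∨ c ∈ l := by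
  intro l
  induction l with
  | nil =>
    intro cur x hx c hc
    simp [piecesAux] at hx; subst hx; exact Or.inl hc
  | cons d t ih =>
    intro cur x hx c hc
    by_cases hda : d = a
    · simp only [piecesAux, if_pos hda, List.mem_cons] at hx
      rcases hx with rfl | hx
      · exact Or.inl hc
      · rcases ih [] x hx c hc with h' | h'
        · simp at h'
        · exact Or.inr (List.mem_cons_of_mem _ h')
    · simp only [piecesAux, if_neg hda] at hx
      rcases ih (cur ++ [d]) x hx c hc with h' | h'
      · rcases List.mem_append.mp h' with h'' | h''
        · exact Or.inl h''
        · simp at h''; subst h''; simp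
      · exact Or.inr (List.mem_cons_of_mem _ h')

theorem flatMap_ite_nil : ∀ (l : List (List Char)),
    (l.flatMap fun t => if t = [] then [] else [t]) = l.filter (fun t => decide (t ≠ [])) := by
  intro l
  induction l with
  | nil => rfl
  | cons x t ih =>
    by_cases hx : x = [] <;> simp [hx, ih]

theorem char_eq_iff (c d : Char) : c = d ↔ c.toNat = d.toNat :=
  ⟨fun h => by rw [h], fun h => Char.ext (UInt32.toNat_inj.mp h)⟩

theorem delim_eq_on_dom (c : Char) (h : pvDomChar c = true) : delimB c = nounDelims.contains c := by
  have h' : ((32 ≤ c.toNat ∧ c.toNat ≤ 126 ∨ c.toNat = 9) ∨ c.toNat = 10) ∨ c.toNat = 13 := by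
    simpa [pvDomChar, Bool.or_eq_true, Bool.and_eq_true] using h
  apply Bool.eq_iff_iff.mpr
  simp only [delimB, delimA, nounDelims, List.contains_eq_mem, List.mem_cons, List.mem_nil_iff,
    decide_eq_true_eq, Bool.or_eq_true, beq_iff_eq, char_eq_iff, PySem.Chars.isspace,
    show (',' : Char).toNat = 44 from rfl, show ('/' : Char).toNat = 47 from rfl,
    show (':' : Char).toNat = 58 from rfl, show ('\t' : Char).toNat = 9 from rfl,
    show ('\n' : Char).toNat = 10 from rfl, show ('\x0D' : Char).toNat = 13 from rfl,
    show ('\x0B' : Char).toNat = 11 from rfl, show ('\x0C' : Char).toNat = 12 from rfl,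
    show (' ' : Char).toNat = 32 from rfl, Bool.and_eq_true, decide_eq_true_eq]
  generalize c.toNat = n at h' ⊢
  constructor
  · intro hh; omega
  · intro hh
    rcases hh with rfl | rfl | rfl | rfl | rfl | rfl | rfl | rfl | rfl | hF
    · decide
    · decide
    · decide
    · decide
    · decide
    · decide
    · decide
    · decide
    · decide
    · exact hF.elim

theorem dom_lowerChar (c : Char) (h : pvDomChar c = true) :
    pvDomChar (PySem.Chars.lowerChar c) = true := by
  have h' : ((32 ≤ c.toNat ∧ c.toNat ≤ 126 ∨ c.toNat = 9) ∨ c.toNat = 10) ∨ c.toNat = 13 := by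
    simpa [pvDomChar, Bool.or_eq_true, Bool.and_eq_true] using h
  simp only [PySem.Chars.lowerChar, PySem.Chars.isupper]
  by_cases hu : 'A' ≤ c ∧ c ≤ 'Z'
  · have hA : 65 ≤ c.toNat := by
      have := hu.1
      simp only [Char.le_def, UInt32.le_iff_toNat_le] at this
      simpa using this
    have hZ : c.toNat ≤ 90 := by
      have := hu.2
      simp only [Char.le_def, UInt32.le_iff_toNat_le] at this
      simpa using this
    have hv : (c.toNat + 32).isValidChar := Or.inl (by omega)
    simp only [hu.1, hu.2, decide_true, Bool.and_self, if_true]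
    simp only [pvDomChar, Char.toNat_ofNat, if_pos hv]
    simp only [Bool.or_eq_true, Bool.and_eq_true, decide_eq_true_eq]
    left
    omega
  · rcases not_and_or.mp hu with hn | hn
    · simp [hn, h]
    · simp [hn, h]

-- the comma → space replacement is absorbed into the delimiter predicate
theorem runsAux_swap : ∀ (l cur : List Char),
    runsAux delimA cur (l.map (fun c => if c = ',' then ' ' else c)) = runsAux delimB cur l := by
  intro l
  induction l with
  | nil => intro cur; rfl
  | cons c t ih =>
    intro cur
    by_cases hc : c = ','
    · subst hc
      have hA : delimA ' ' = true := by decide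
      have hB : delimB ',' = true := by decide
      simp only [List.map_cons, runsAux, hA, hB, if_true, ih]
    · have hAB : delimA c = delimB c := by simp [delimB, hc]
      simp only [List.map_cons, if_neg hc, runsAux, hAB, ih]

-- A's innermost loop over w.split(":")
theorem inner_loop_eq (w : List Char) (hw : ∀ c ∈ w, PySem.Chars.isspace c = false) :
    ∀ (tokens : List (List Char)),
    (PySem.Chars.splitOn w [':']).foldl (fun tokens t =>
        let t := PySem.Chars.strip t
        if t ≠ [] then tokens ++ [t] else tokens) tokens
    = tokens ++ runsAux (fun c => c == ':' || (fun _ => false) c) [] w := by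
  intro tokens
  show (PySem.Chars.splitOn w [':']).foldl (fun tokens t =>
      if PySem.Chars.strip t ≠ [] then tokens ++ [PySem.Chars.strip t] else tokens) tokens = _
  rw [PySem.List.foldl_append_ite (fun t => PySem.Chars.strip t ≠ []) PySem.Chars.strip]
  congr 1
  rw [splitOn_eq_pieces]
  have hstrip : ∀ t ∈ piecesAux ':' [] w, PySem.Chars.strip t = t := by
    intro t ht
    apply strip_id
    intro c hc
    rcases piecesAux_mem ':' w [] t ht c hc with h' | h'
    · simp at h'
    · exact hw c h'
  have h1 : List.filter (fun t => decide (PySem.Chars.strip t ≠ [])) (piecesAux ':' [] w)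
      = List.filter (fun t => decide (t ≠ [])) (piecesAux ':' [] w) :=
    List.filter_congr (fun t ht => by simp [hstrip t ht])
  rw [h1]
  have h2 : List.map PySem.Chars.strip
        (List.filter (fun t => decide (t ≠ [])) (piecesAux ':' [] w))
      = List.map id (List.filter (fun t => decide (t ≠ [])) (piecesAux ':' [] w)) :=
    List.map_congr_left (fun t ht => hstrip t (List.mem_of_mem_filter ht))
  rw [h2, List.map_id]
  rw [← flatMap_ite_nil (piecesAux ':' [] w)]
  rw [show (fun t : List Char => if t = [] then ([] : List (List Char)) else [t])
        = (fun t : List Char => runsAux (fun _ => false) [] t) from ?_]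
  · exact piecesAux_flatMap ':' (fun _ => false) w [] (by simp)
  · funext t
    rw [runsAux_all_not t [] (by simp)]
    simp

-- A's middle loop over part.split()
theorem mid_loop_eq (part : List Char) :
    ∀ (tokens : List (List Char)),
    (PySem.Chars.split₀ (PySem.Chars.strip part)).foldl (fun tokens w =>
        (PySem.Chars.splitOn w [':']).foldl (fun tokens t =>
          let t := PySem.Chars.strip t
          if t ≠ [] then tokens ++ [t] else tokens) tokens) tokens
    = tokens ++ runsAux (fun c => PySem.Chars.isspace c || (c == ':' || false)) [] part := by
  intro tokens
  rw [strip_split₀, split₀_eq_runs]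
  rw [PySem.List.foldl_congr_mem'
    (g := fun tokens w => tokens ++ runsAux (fun c => c == ':' || false) [] w) _ _ _ ?_]
  · rw [PySem.List.foldl_append_eq_flatMap]
    congr 1
    exact runsAux_compose PySem.Chars.isspace (fun c => c == ':' || false) part [] (by simp)
  · intro w hw tokens
    exact inner_loop_eq w (runsAux_mem_not part [] w (by simp) hw) tokens

-- B's single scan: flushing the final partial token equals collecting all runs into the set
theorem b_loop : ∀ (l : List Char) (tok : PySem.Set String) (cur : List Char),
    (let st := l.foldl (fun (st : PySem.Set String × List Char) ch =>
        if nounDelims.contains ch then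
          (if st.2 ≠ [] then (PySem.Set.add st.1 (String.ofList st.2), ([] : List Char)) else st)
        else (st.1, st.2 ++ [ch])) (tok, cur);
     if st.2 ≠ [] then PySem.Set.add st.1 (String.ofList st.2) else st.1)
    = PySem.Set.update tok ((runsAux (fun c => nounDelims.contains c) cur l).map String.ofList) := by
  intro l
  induction l with
  | nil =>
    intro tok cur
    by_cases hcur : cur = [] <;>
      simp [runsAux, hcur, PySem.Set.update]
  | cons c t ih =>
    intro tok cur
    by_cases hc : nounDelims.contains c = true
    · have hmem : c ∈ nounDelims := by simpa using hc
      by_cases hcur : cur = []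
      · subst hcur
        simp only [List.foldl_cons, hc, if_true, ne_eq, not_true_eq_false, if_false]
        rw [ih tok []]
        simp [runsAux, hmem]
      · simp only [List.foldl_cons, hc, if_true, ne_eq, hcur, not_false_eq_true, if_true]
        rw [ih (PySem.Set.add tok (String.ofList cur)) []]
        simp only [runsAux, hc, if_true, if_neg hcur, List.map_cons]
        simp [PySem.Set.update]
    · have hmem : c ∉ nounDelims := by simpa using hc
      simp only [List.foldl_cons, hc, Bool.false_eq_true, if_false]
      rw [ih tok (cur ++ [c])]
      simp only [runsAux, hc, Bool.false_eq_true, if_false]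

-- the two sides agree for any character list whose delimiter tests agree on its characters
theorem main_eq (L : List Char) (hL : ∀ x ∈ L, delimB x = nounDelims.contains x) :
    PySem.Set.ofList
      ((((PySem.Chars.splitOn (PySem.Chars.replace L [','] [' ']) ['/']).foldl (fun tokens part =>
          (PySem.Chars.split₀ (PySem.Chars.strip part)).foldl (fun tokens w =>
            (PySem.Chars.splitOn w [':']).foldl (fun tokens t =>
              let t := PySem.Chars.strip t
              if t ≠ [] then tokens ++ [t] else tokens) tokens) tokens) []).map String.ofList))
    = (let st := L.foldl (fun (st : PySem.Set String × List Char) ch =>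
          if nounDelims.contains ch then
            (if st.2 ≠ [] then (PySem.Set.add st.1 (String.ofList st.2), ([] : List Char)) else st)
          else (st.1, st.2 ++ [ch])) (PySem.Set.empty, []);
       if st.2 ≠ [] then PySem.Set.add st.1 (String.ofList st.2) else st.1) := by
  rw [b_loop L PySem.Set.empty []]
  rw [replace_single ',' ' ' L, splitOn_eq_pieces '/']
  rw [PySem.List.foldl_congr_mem'
    (g := fun tokens part => tokens ++
      runsAux (fun c => PySem.Chars.isspace c || (c == ':' || false)) [] part) _ _ _
    (fun part _ tokens => mid_loop_eq part tokens)]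
  rw [PySem.List.foldl_append_eq_flatMap]
  rw [piecesAux_flatMap '/' (fun c => PySem.Chars.isspace c || (c == ':' || false))
    (L.map (fun c => if c = ',' then ' ' else c)) [] (by simp)]
  rw [List.nil_append, List.nil_append]
  rw [runsAux_congr (q := delimA) _ [] (by intro x _; simp [delimA, Bool.or_assoc])]
  rw [runsAux_swap L []]
  rw [runsAux_congr (q := fun c => nounDelims.contains c) L [] hL]
  rw [PySem.Set.ofList_eq_foldl]
  rfl

-- ===== VERDICT (by name: the statement is the Claim_ definition above) =====
theorem noun_token_bag_py_spec : Claim_equal_noun_token_bag_py := by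
  intro s hdom
  unfold Spec_noun_token_bag_py
  by_cases hs : s = ""
  · simp [noun_token_bag_py, noun_token_bag_py_alt, hs]
  · have hdomc : ∀ c ∈ s.toList, pvDomChar c = true := by
      have h := hdom
      unfold Dom_noun_token_bag_py pvDomStr at h
      simpa [List.all_eq_true] using h
    have hL : ∀ x ∈ PySem.Chars.lower s.toList, delimB x = nounDelims.contains x := by
      intro x hx
      simp only [PySem.Chars.lower, List.mem_map] at hx
      obtain ⟨c, hc, rfl⟩ := hx
      exact delim_eq_on_dom _ (dom_lowerChar c (hdomc c hc))
    simp only [noun_token_bag_py, noun_token_bag_py_alt, if_neg hs]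
    exact main_eq (PySem.Chars.lower s.toList) hL
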